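-- pv_equiv track=rewrite | github.com/ajbrumleve/2023_AdentofCode | Day3.py | process_number_2
-- ===== SOURCE A (Python) =====
-- def process_number_2(number, num_dict, symbol_dict, gear_dict):
--     for line in range(num_dict["line"] - 1, num_dict["line"] + 2):
--         if line in symbol_dict.keys():
--             cols_to_check = range(num_dict["first"] - 1, num_dict["last"] + 2)
--             for col in cols_to_check:
--                 if col in symbol_dict[line].keys():
--                     if symbol_dict[line][col] == "*":
--                         gear_dict[(line, col)] = gear_dict.get((line, col), [])
--                         gear_dict[(line, col)].append(number)
--     return gear_dict
-- ===== SOURCE B (Python) =====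
-- def process_number_2(number, num_dict, symbol_dict, gear_dict):
--     target = num_dict["line"]
--     cand = [(line, syms) for line, syms in symbol_dict.items()
--             if abs(line - target) <= 1]
--     if not cand:
--         return gear_dict
--     lo = num_dict["first"] - 1
--     hi = num_dict["last"] + 1
--     hits = sorted((line, col)
--                   for line, syms in cand
--                   for col, sym in syms.items()
--                   if lo <= col <= hi and sym == "*")
--     for key in hits:
--         gear_dict.setdefault(key, []).append(number)
--     return gear_dict
-- ===== Notes on version B (the rewrite author's own statement) =====
-- stated objective: alternative
-- what changed: B collects all adjacent '*' positions in one flat comprehension over the existing symbol entries, sorts them, and applies the gear_dict updates in a single separate pass, instead of A's nested loops probing every column index of the window for dict membership on each of three candidate lines.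
import Mathlib
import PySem

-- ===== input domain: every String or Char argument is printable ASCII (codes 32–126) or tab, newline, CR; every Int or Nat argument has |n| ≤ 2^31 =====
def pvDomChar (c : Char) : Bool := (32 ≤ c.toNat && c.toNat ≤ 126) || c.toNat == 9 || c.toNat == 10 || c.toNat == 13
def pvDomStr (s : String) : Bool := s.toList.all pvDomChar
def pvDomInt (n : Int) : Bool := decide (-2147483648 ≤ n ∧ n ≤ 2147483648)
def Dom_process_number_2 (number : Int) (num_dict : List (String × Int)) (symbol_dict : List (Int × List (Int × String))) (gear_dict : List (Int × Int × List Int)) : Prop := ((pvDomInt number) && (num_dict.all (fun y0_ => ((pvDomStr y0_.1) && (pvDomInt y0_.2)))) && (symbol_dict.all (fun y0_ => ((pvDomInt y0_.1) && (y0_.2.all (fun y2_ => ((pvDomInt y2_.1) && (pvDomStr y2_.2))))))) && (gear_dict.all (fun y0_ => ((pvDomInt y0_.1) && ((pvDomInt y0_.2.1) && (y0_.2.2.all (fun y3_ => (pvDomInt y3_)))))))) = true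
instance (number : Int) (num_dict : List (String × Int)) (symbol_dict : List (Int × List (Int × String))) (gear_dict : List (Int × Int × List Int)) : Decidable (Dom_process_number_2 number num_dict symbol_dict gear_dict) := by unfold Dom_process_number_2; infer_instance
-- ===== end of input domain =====

-- B gathers all adjacent '*' positions in one flat pass over the existing symbol entries, sorts
-- them, and then applies the gear_dict updates in a single separate pass; A probes every column
-- index of the window for dict membership inside nested line/column loops.  Return-value
-- equivalence; the Python A mutates gear_dict in place (B performs the same mutation).

-- gear_dict has flattened tuple keys (line, col); this helper is the exact hand port of
-- `gear_dict[(l,c)] = gear_dict.get((l,c), []); gear_dict[(l,c)].append(number)` (equally of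
-- `gear_dict.setdefault((l,c), []).append(number)`): overwrite-in-place of the first matching
-- key, appending a fresh key at the end — Python dict assignment semantics.
def gearAppend (gd : List (Int × Int × List Int)) (l c number : Int) : List (Int × Int × List Int) :=
  match gd with
  | [] => [(l, c, [number])]
  | (l', c', v) :: rest =>
    if l' = l ∧ c' = c then (l', c', v ++ [number]) :: rest
    else (l', c', v) :: gearAppend rest l c number

-- ===== PORT A =====
def process_number_2 (number : Int) (num_dict : List (String × Int)) (symbol_dict : List (Int × List (Int × String))) (gear_dict : List (Int × Int × List Int)) : List (Int × Int × List Int) :=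
  let nd := PySem.Dict.mk num_dict
  let lineV := (nd.get? "line").getD 0      -- Pre_ guarantees each key A reads is present (KeyError otherwise)
  (PySem.List.pyRange (lineV - 1) (lineV + 2) 1).foldl (fun gd line =>
    match (PySem.Dict.mk symbol_dict).get? line with
    | none => gd
    | some syms =>
      (PySem.List.pyRange ((nd.get? "first").getD 0 - 1) ((nd.get? "last").getD 0 + 2) 1).foldl (fun gd col =>
        match (PySem.Dict.mk syms).get? col with
        | none => gd
        | some s => if s = "*" then gearAppend gd line col number else gd) gd) gear_dict

-- ===== PORT B =====
def process_number_2_alt (number : Int) (num_dict : List (String × Int)) (symbol_dict : List (Int × List (Int × String))) (gear_dict : List (Int × Int × List Int)) : List (Int × Int × List Int) :=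
  let nd := PySem.Dict.mk num_dict
  let target := (nd.get? "line").getD 0
  let cand := symbol_dict.filter (fun e => decide ((e.1 - target).natAbs ≤ 1))
  if cand.isEmpty then gear_dict
  else
    (PySem.List.sorted2 (cand.flatMap (fun e =>
      (e.2.filter (fun p => decide ((nd.get? "first").getD 0 - 1 ≤ p.1 ∧ p.1 ≤ (nd.get? "last").getD 0 + 1) && (p.2 == "*"))).map
        (fun p => (e.1, p.1)))) Prod.fst Prod.snd).foldl
      (fun gd key => gearAppend gd key.1 key.2 number) gear_dict

-- ===== PRECONDITION & SPEC =====
-- Pre_ requires num_dict to contain the keys A actually reads ("line" always; "first"/"last"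
-- as soon as one of the three candidate lines is a key of symbol_dict — Python A raises
-- KeyError otherwise) and excludes association lists with duplicate keys, which cannot arise
-- from the Python dict arguments.
def Pre_process_number_2 (number : Int) (num_dict : List (String × Int)) (symbol_dict : List (Int × List (Int × String))) (gear_dict : List (Int × Int × List Int)) : Prop :=
  "line" ∈ num_dict.map Prod.fst ∧
  ((∃ l ∈ symbol_dict.map Prod.fst,
      l = ((PySem.Dict.mk num_dict).get? "line").getD 0 - 1 ∨
      l = ((PySem.Dict.mk num_dict).get? "line").getD 0 ∨
      l = ((PySem.Dict.mk num_dict).get? "line").getD 0 + 1) →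
    "first" ∈ num_dict.map Prod.fst ∧ "last" ∈ num_dict.map Prod.fst) ∧
  (num_dict.map Prod.fst).Nodup ∧ (symbol_dict.map Prod.fst).Nodup ∧
  (∀ e ∈ symbol_dict, (e.2.map Prod.fst).Nodup) ∧
  (gear_dict.map (fun e => (e.1, e.2.1))).Nodup
instance (number : Int) (num_dict : List (String × Int)) (symbol_dict : List (Int × List (Int × String))) (gear_dict : List (Int × Int × List Int)) : Decidable (Pre_process_number_2 number num_dict symbol_dict gear_dict) := by unfold Pre_process_number_2; infer_instance

def pvWitness_process_number_2 : Int × (List (String × Int)) × (List (Int × List (Int × String))) × (List (Int × Int × List Int)) :=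
  (5, [("line", 1), ("first", 2), ("last", 3)], [(1, [(1, "*"), (4, "*"), (3, ".")]), (2, [(2, "*")])], [])

def Spec_process_number_2 (number : Int) (num_dict : List (String × Int)) (symbol_dict : List (Int × List (Int × String))) (gear_dict : List (Int × Int × List Int)) (out : List (Int × Int × List Int)) : Prop := out = process_number_2_alt number num_dict symbol_dict gear_dict
instance (number : Int) (num_dict : List (String × Int)) (symbol_dict : List (Int × List (Int × String))) (gear_dict : List (Int × Int × List Int)) (out : List (Int × Int × List Int)) : Decidable (Spec_process_number_2 number num_dict symbol_dict gear_dict out) := by unfold Spec_process_number_2; infer_instance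

-- ===== CLAIM (what is proved, stated in full; the proofs are below) =====
def Claim_equal_process_number_2 : Prop := ∀ (number : Int) (num_dict : List (String × Int)) (symbol_dict : List (Int × List (Int × String))) (gear_dict : List (Int × Int × List Int)), Dom_process_number_2 number num_dict symbol_dict gear_dict → Pre_process_number_2 number num_dict symbol_dict gear_dict → Spec_process_number_2 number num_dict symbol_dict gear_dict (process_number_2 number num_dict symbol_dict gear_dict)

-- ===== LEMMAS AND PROOFS =====

theorem pv_foldl_filter_eq {α β : Type} (p : β → Bool) (f g : α → β → α) (l : List β)
    (h : ∀ x ∈ l, (p x = true → ∀ acc, f acc x = g acc x) ∧ (p x = false → ∀ acc, f acc x = acc)) :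
    ∀ init, l.foldl f init = (l.filter p).foldl g init := by
  induction l with
  | nil => intro init; rfl
  | cons a t ih =>
    intro init
    have ha := h a (by simp)
    have ht := fun x hx => h x (List.mem_cons_of_mem a hx)
    by_cases hp : p a = true
    · rw [List.foldl_cons, List.filter_cons_of_pos hp, List.foldl_cons, ha.1 hp init]
      exact ih ht _
    · rw [List.foldl_cons, List.filter_cons_of_neg (by simpa using hp),
        ha.2 (by simpa using hp) init]
      exact ih ht _

-- a flatMap of blocks of (tag, col) pairs with pairwise-distinct tags and nodup cols is nodup
theorem pv_nodup_flatMap_tag {α β γ : Type} [DecidableEq γ] (l : List α) (k : α → γ) (C : α → List β)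
    (hk : (l.map k).Nodup) (hc : ∀ e ∈ l, (C e).Nodup) :
    (l.flatMap (fun e => (C e).map (fun c => (k e, c)))).Nodup := by
  induction l with
  | nil => simp
  | cons a tl ih =>
    simp only [List.flatMap_cons, List.nodup_append]
    refine ⟨(hc a (by simp)).map (fun c₁ c₂ h => (Prod.ext_iff.1 h).2), ih (by simpa using hk.of_cons)
      (fun e he => hc e (List.mem_cons_of_mem a he)), fun x hx y hy hne => ?_⟩
    obtain ⟨c, _, rfl⟩ := List.mem_map.1 hx
    obtain ⟨e, he, hxe⟩ := List.mem_flatMap.1 hy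
    obtain ⟨c', _, heq⟩ := List.mem_map.1 hxe
    rw [← hne] at heq
    have hkk : k a = k e := (Prod.ext_iff.1 heq).1.symm
    have hka : k a ∉ tl.map k := by
      simp only [List.map_cons, List.nodup_cons] at hk; exact hk.1
    exact hka (hkk ▸ List.mem_map_of_mem he)

-- sorted() on 2-tuples is sorted with the lexicographic key
theorem pv_sorted2_lex (xs : List (Int × Int)) :
    PySem.List.sorted2 xs Prod.fst Prod.snd
      = PySem.List.sorted xs (fun x => toLex (x.1, x.2)) := by
  have hb : (fun (a b : Int × Int) => decide (a.1 < b.1) || (!decide (b.1 < a.1) && decide (a.2 < b.2)))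
      = (fun (a b : Int × Int) => decide ((toLex (a.1, a.2) : Lex (Int × Int)) < toLex (b.1, b.2))) := by
    funext a b
    by_cases h1 : a.1 < b.1 <;> by_cases h2 : b.1 < a.1 <;> by_cases h3 : a.2 < b.2 <;>
      simp [h1, h2, h3, Prod.Lex.lt_iff] <;> omega
  simp only [PySem.List.sorted2, PySem.List.sorted, hb, Bool.false_eq_true, if_false]

-- proof-only helpers: the column test and the per-line hit list of A's traversal
def pvQ (syms : List (Int × String)) (col : Int) : Bool :=
  decide ((PySem.Dict.mk syms).get? col = some "*")

def pvG (symbol_dict : List (Int × List (Int × String))) (firstV lastV : Int) (line : Int) : List (Int × Int) :=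
  match (PySem.Dict.mk symbol_dict).get? line with
  | none => []
  | some syms => ((PySem.List.pyRange (firstV - 1) (lastV + 2) 1).filter (pvQ syms)).map (fun c => (line, c))

theorem pv_line (number line firstV lastV : Int) (syms : List (Int × String))
    (gd : List (Int × Int × List Int)) :
    (PySem.List.pyRange (firstV - 1) (lastV + 2) 1).foldl (fun gd col =>
      match (PySem.Dict.mk syms).get? col with
      | none => gd
      | some s => if s = "*" then gearAppend gd line col number else gd) gd
    = (((PySem.List.pyRange (firstV - 1) (lastV + 2) 1).filter (pvQ syms)).map (fun c => (line, c))).foldl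
        (fun gd key => gearAppend gd key.1 key.2 number) gd := by
  rw [List.foldl_map]
  refine pv_foldl_filter_eq (pvQ syms) _ _ _ (fun col hcol => ⟨?_, ?_⟩) gd
  · intro hq acc
    have hstar : (PySem.Dict.mk syms).get? col = some "*" := by simpa [pvQ] using hq
    rw [hstar]
    simp
  · intro hq acc
    rcases hs : (PySem.Dict.mk syms).get? col with _ | s
    · rfl
    · have hne : ¬ s = "*" := by simpa [pvQ, hs] using hq
      simp [hne]

theorem pv_main (number t firstV lastV : Int) (symbol_dict : List (Int × List (Int × String))) (gear_dict : List (Int × Int × List Int))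
    (hKeys : (symbol_dict.map Prod.fst).Nodup)
    (hInner : ∀ e ∈ symbol_dict, (e.2.map Prod.fst).Nodup) :
    (PySem.List.pyRange (t - 1) (t + 2) 1).foldl (fun gd line =>
      match (PySem.Dict.mk symbol_dict).get? line with
      | none => gd
      | some syms =>
        (PySem.List.pyRange (firstV - 1) (lastV + 2) 1).foldl (fun gd col =>
          match (PySem.Dict.mk syms).get? col with
          | none => gd
          | some s => if s = "*" then gearAppend gd line col number else gd) gd) gear_dict
    = (if (symbol_dict.filter (fun e => decide ((e.1 - t).natAbs ≤ 1))).isEmpty then gear_dict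
       else (PySem.List.sorted2 ((symbol_dict.filter (fun e => decide ((e.1 - t).natAbs ≤ 1))).flatMap (fun e =>
          (e.2.filter (fun p => decide (firstV - 1 ≤ p.1 ∧ p.1 ≤ lastV + 1) && (p.2 == "*"))).map
            (fun p => (e.1, p.1)))) Prod.fst Prod.snd).foldl
          (fun gd key => gearAppend gd key.1 key.2 number) gear_dict) := by
  have hrange : PySem.List.pyRange (t - 1) (t + 2) 1 = [t - 1, t, t + 1] := by
    rw [PySem.List.pyRange_one_cons (by omega), PySem.List.pyRange_one_cons (by omega),
      PySem.List.pyRange_one_cons (by omega), PySem.List.pyRange_one_eq_nil (by omega)]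
    norm_num
  set cand := symbol_dict.filter (fun e => decide ((e.1 - t).natAbs ≤ 1)) with hcand
  set pf : Int × String → Bool :=
    fun p => decide (firstV - 1 ≤ p.1 ∧ p.1 ≤ lastV + 1) && (p.2 == "*") with hpf
  set hits := cand.flatMap (fun e => (e.2.filter pf).map (fun p => (e.1, p.1))) with hhits
  set LA := [t - 1, t, t + 1].flatMap (pvG symbol_dict firstV lastV) with hLA
  -- Step A: A's nested loops are one fold of gearAppend over LA
  have hA : (PySem.List.pyRange (t - 1) (t + 2) 1).foldl (fun gd line =>
      match (PySem.Dict.mk symbol_dict).get? line with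
      | none => gd
      | some syms =>
        (PySem.List.pyRange (firstV - 1) (lastV + 2) 1).foldl (fun gd col =>
          match (PySem.Dict.mk syms).get? col with
          | none => gd
          | some s => if s = "*" then gearAppend gd line col number else gd) gd) gear_dict
      = LA.foldl (fun gd key => gearAppend gd key.1 key.2 number) gear_dict := by
    rw [hrange, hLA, List.foldl_flatMap]
    refine PySem.List.foldl_congr_mem _ _ _ _ (fun gd line _ => ?_)
    rcases hs : (PySem.Dict.mk symbol_dict).get? line with _ | syms
    · simp [pvG, hs]
    · simp only [pvG, hs]
      exact pv_line number line firstV lastV syms gd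
  -- membership characterisation: LA and hits hold the same (line, col) pairs
  have hmem : ∀ x : Int × Int, x ∈ LA ↔ x ∈ hits := by
    rintro ⟨l, c⟩
    rw [hLA, hhits]
    simp only [List.mem_flatMap, List.mem_cons, List.not_mem_nil, or_false]
    constructor
    · rintro ⟨line, hline, hxg⟩
      rcases hs : (PySem.Dict.mk symbol_dict).get? line with _ | syms
      · simp [pvG, hs] at hxg
      · simp only [pvG, hs] at hxg
        obtain ⟨col, hcolmem, heq⟩ := List.mem_map.1 hxg
        obtain ⟨hl, hc⟩ := Prod.mk.injEq .. ▸ heq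
        obtain ⟨hr, hq⟩ := List.mem_filter.1 hcolmem
        have hrng := PySem.List.mem_pyRange_one.1 hr
        have hstar : (PySem.Dict.mk syms).get? col = some "*" := by simpa [pvQ] using hq
        have hes : (line, syms) ∈ symbol_dict := by
          simpa [PySem.Dict.items] using PySem.Dict.mem_items_of_get?_eq_some _ hs
        have hcs : (col, "*") ∈ syms := by
          simpa [PySem.Dict.items] using PySem.Dict.mem_items_of_get?_eq_some _ hstar
        refine ⟨(line, syms), List.mem_filter.2 ⟨hes, by
          simp only [decide_eq_true_eq]
          rcases hline with h | h | h <;> omega⟩, List.mem_map.2 ⟨(col, "*"),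
          List.mem_filter.2 ⟨hcs, by simp [hpf]; omega⟩, by simp [hl, hc]⟩⟩
    · rintro ⟨⟨line, syms⟩, hecand, hxe⟩
      obtain ⟨hes, habs⟩ := List.mem_filter.1 hecand
      obtain ⟨⟨col, sym⟩, hpmem, heq⟩ := List.mem_map.1 hxe
      obtain ⟨hps, hpok⟩ := List.mem_filter.1 hpmem
      have hbounds : (firstV - 1 ≤ col ∧ col ≤ lastV + 1) ∧ sym = "*" := by
        simpa [hpf] using hpok
      have hs : (PySem.Dict.mk symbol_dict).get? line = some syms :=
        PySem.Dict.get?_of_mem_items _ (by simpa [PySem.Dict.items] using hes)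
          (by simpa [PySem.Dict.keys] using hKeys)
      have hstar : (PySem.Dict.mk syms).get? col = some "*" :=
        PySem.Dict.get?_of_mem_items _ (by simpa [PySem.Dict.items] using hbounds.2 ▸ hps)
          (by simpa [PySem.Dict.keys] using hInner (line, syms) hes)
      have habs' : (line - t).natAbs ≤ 1 := by simpa using habs
      refine ⟨line, by omega, ?_⟩
      simp only [pvG, hs]
      refine List.mem_map.2 ⟨col, List.mem_filter.2 ⟨PySem.List.mem_pyRange_one.2 ⟨hbounds.1.1, by omega⟩,
        by simp [pvQ, hstar]⟩, by simpa using (Prod.mk.injEq .. ▸ heq)⟩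
  -- LA is strictly increasing in the lexicographic order of (line, col)
  have hpair : LA.Pairwise (fun a b : Int × Int =>
      (toLex (a.1, a.2) : Lex (Int × Int)) < toLex (b.1, b.2)) := by
    have hGfst : ∀ line x, x ∈ pvG symbol_dict firstV lastV line → x.1 = line := by
      intro line x hx
      rcases hs : (PySem.Dict.mk symbol_dict).get? line with _ | syms
      · simp [pvG, hs] at hx
      · simp only [pvG, hs] at hx
        obtain ⟨col, _, rfl⟩ := List.mem_map.1 hx
        rfl
    have hGblock : ∀ line, (pvG symbol_dict firstV lastV line).Pairwise (fun a b : Int × Int =>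
        (toLex (a.1, a.2) : Lex (Int × Int)) < toLex (b.1, b.2)) := by
      intro line
      rcases hs : (PySem.Dict.mk symbol_dict).get? line with _ | syms
      · simp [pvG, hs]
      · simp only [pvG, hs]
        refine List.pairwise_map.2 (((PySem.List.pairwise_lt_pyRange_one _ _).filter _).imp ?_)
        intro a b hab
        exact Prod.Lex.lt_iff.2 (Or.inr ⟨rfl, hab⟩)
    have hcross : ∀ l1 l2 : Int, l1 < l2 → ∀ a ∈ pvG symbol_dict firstV lastV l1,
        ∀ b ∈ pvG symbol_dict firstV lastV l2,
        (toLex (a.1, a.2) : Lex (Int × Int)) < toLex (b.1, b.2) := by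
      intro l1 l2 hlt a ha b hb
      exact Prod.Lex.lt_iff.2 (Or.inl (by rw [hGfst l1 a ha, hGfst l2 b hb]; exact hlt))
    rw [hLA]
    simp only [List.flatMap_cons, List.flatMap_nil, List.append_nil]
    refine List.pairwise_append.2 ⟨hGblock _, List.pairwise_append.2
      ⟨hGblock _, hGblock _, fun a ha b hb => hcross t (t + 1) (by omega) a ha b hb⟩, ?_⟩
    intro a ha b hb
    rcases List.mem_append.1 hb with hb | hb
    · exact hcross (t - 1) t (by omega) a ha b hb
    · exact hcross (t - 1) (t + 1) (by omega) a ha b hb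
  have ndLA : LA.Nodup :=
    hpair.imp (fun {a b} h heq => by rw [heq] at h; exact lt_irrefl _ h)
  have ndHits : hits.Nodup := by
    have hform : hits = cand.flatMap (fun e =>
        ((e.2.filter pf).map Prod.fst).map (fun c => (e.1, c))) := by
      rw [hhits]
      simp only [List.map_map, Function.comp_def]
    rw [hform]
    refine pv_nodup_flatMap_tag cand Prod.fst _ ?_ ?_
    · exact hKeys.sublist (List.filter_sublist.map _)
    · exact fun e he => (hInner e (List.mem_of_mem_filter he)).sublist (List.filter_sublist.map _)
  have hperm : LA.Perm hits := (List.perm_ext_iff_of_nodup ndLA ndHits).2 hmem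
  have hsort : PySem.List.sorted2 hits Prod.fst Prod.snd = LA := by
    rw [pv_sorted2_lex]
    exact PySem.List.sorted_eq_of_perm_of_pairwise_lt _ _ _ hperm hpair
  rw [hA]
  by_cases hempty : cand.isEmpty
  · have hc0 : cand = [] := List.isEmpty_iff.1 hempty
    have hh0 : hits = [] := by rw [hhits, hc0]; rfl
    have hLA0 : LA = [] := by rw [← hsort, hh0]; rfl
    rw [if_pos hempty, hLA0]
    rfl
  · rw [if_neg hempty, hsort]

-- ===== VERDICT (by name: the statement is the Claim_ definition above) =====
theorem process_number_2_spec : Claim_equal_process_number_2 := by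
  intro number num_dict symbol_dict gear_dict _hDom hPre
  obtain ⟨_, _, _, hKeys, hInner, _⟩ := hPre
  unfold Spec_process_number_2 process_number_2 process_number_2_alt
  exact pv_main number ((PySem.Dict.mk num_dict).get? "line" |>.getD 0)
    ((PySem.Dict.mk num_dict).get? "first" |>.getD 0)
    ((PySem.Dict.mk num_dict).get? "last" |>.getD 0) symbol_dict gear_dict hKeys hInner
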